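-- pv_equiv track=rewrite | github.com/BorgonPL/Codewars | codewars_proj/7_kyu_codewars/Clean_up_after_your_dog.py | crap
-- ===== SOURCE A (Python) =====
-- def crap(garden, bags, cap):
--     r=0
--     for e in garden:
--         if e.count("D")>0:
--             return "Dog!!"
--         r+=e.count("@")
--     if r>(bags*cap):
--         return "Cr@p"
--     else:
--         return "Clean"
-- ===== SOURCE B (Python) =====
-- def crap(garden, bags, cap):
--     # Build a character histogram of the whole garden once, then answer by lookups.
--     freq = {}
--     for row in garden:
--         for ch in row:
--             freq[ch] = freq.get(ch, 0) + 1
--     if freq.get("D", 0) > 0: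
--         return "Dog!!"
--     return "Cr@p" if freq.get("@", 0) > bags * cap else "Clean"
-- ===== Notes on version B (the rewrite author's own statement) =====
-- stated objective: alternative
-- what changed: B replaces A's early-exit scan with per-row substring counts by a single pass that builds a character-frequency dictionary (histogram) of the whole garden, and then answers purely by two dictionary lookups ('D' and '@'); no early return and no string count calls remain.
import Mathlib
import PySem

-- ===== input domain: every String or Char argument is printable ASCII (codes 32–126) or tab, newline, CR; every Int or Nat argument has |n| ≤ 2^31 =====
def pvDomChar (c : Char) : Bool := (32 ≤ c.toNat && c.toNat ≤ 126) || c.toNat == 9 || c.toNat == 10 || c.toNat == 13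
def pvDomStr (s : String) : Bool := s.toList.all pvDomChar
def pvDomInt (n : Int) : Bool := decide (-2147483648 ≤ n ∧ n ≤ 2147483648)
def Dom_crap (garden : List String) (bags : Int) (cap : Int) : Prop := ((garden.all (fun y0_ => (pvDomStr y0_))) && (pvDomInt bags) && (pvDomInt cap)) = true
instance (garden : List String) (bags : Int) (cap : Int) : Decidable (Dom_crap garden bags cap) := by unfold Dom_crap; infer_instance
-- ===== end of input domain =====

-- B builds a character-frequency dictionary of the whole garden once and answers by two lookups; objective: alternative.

-- ===== PORT A =====
-- A's for-loop with its early return "Dog!!" and the running '@' accumulator r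
def crapLoop (garden : List String) (bags : Int) (cap : Int) (r : Int) : String :=
  match garden with
  | [] => if r > bags * cap then "Cr@p" else "Clean"
  | e :: rest =>
      if (PySem.Str.count e "D" : Int) > 0 then "Dog!!"
      else crapLoop rest bags cap (r + (PySem.Str.count e "@" : Int))

def crap (garden : List String) (bags : Int) (cap : Int) : String :=
  crapLoop garden bags cap 0

-- ===== PORT B =====
def crap_alt (garden : List String) (bags : Int) (cap : Int) : String :=
  let freq : PySem.Dict Char Int :=
    garden.foldl (fun d row => row.toList.foldl (fun d ch => d.modify ch 0 (· + 1)) d)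
      PySem.Dict.empty
  if freq.getD 'D' 0 > 0 then "Dog!!"
  else if freq.getD '@' 0 > bags * cap then "Cr@p" else "Clean"

-- ===== PRECONDITION & SPEC =====
def Spec_crap (garden : List String) (bags : Int) (cap : Int) (out : String) : Prop := out = crap_alt garden bags cap
instance (garden : List String) (bags : Int) (cap : Int) (out : String) : Decidable (Spec_crap garden bags cap out) := by unfold Spec_crap; infer_instance

-- ===== CLAIM =====
def Claim_equal_crap : Prop := ∀ (garden : List String) (bags : Int) (cap : Int), Dom_crap garden bags cap → Spec_crap garden bags cap (crap garden bags cap)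

-- ===== LEMMAS AND PROOFS =====

-- non-overlapping substring count of a single-character pattern is plain List.count
theorem countGo_single (c : Char) : ∀ (fuel : Nat) (s : List Char) (acc : Nat),
    s.length ≤ fuel → PySem.Chars.count.go [c] fuel s acc = acc + s.count c := by
  intro fuel
  induction fuel with
  | zero => intro s acc h; cases s with
    | nil => simp [PySem.Chars.count.go]
    | cons a t => simp at h
  | succ n ih => intro s acc h; cases s with
    | nil => simp [PySem.Chars.count.go]
    | cons a t =>
        simp only [PySem.Chars.count.go, List.isPrefixOf]
        by_cases hc : c == a
        · simp only [hc, Bool.true_and, if_pos]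
          have := ih t (acc + 1) (by simpa using Nat.le_of_succ_le_succ h)
          simp only [List.length_cons] at h
          simp [this, (beq_iff_eq.mp hc).symm]
          omega
        · simp only [hc, Bool.false_and, if_neg, Bool.false_eq_true, not_false_iff]
          have := ih t acc (by simpa using Nat.le_of_succ_le_succ h)
          simp only [List.length_cons] at h
          have hne : ¬ (a == c) = true := by
            intro hab; exact hc (by simpa [beq_iff_eq] using (beq_iff_eq.mp hab).symm)
          simp [this, List.count_cons, hne]

theorem count_single (s : List Char) (c : Char) : PySem.Chars.count s [c] = s.count c := by
  simp [PySem.Chars.count]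
  simpa using countGo_single c s.length s 0 le_rfl

-- A's loop computes "Dog!!" iff some row contains 'D', else compares the total '@' count
theorem crapLoop_eq (garden : List String) (bags cap : Int) : ∀ (r : Int),
    crapLoop garden bags cap r =
      if garden.any (fun e => 'D' ∈ e.toList) then "Dog!!"
      else if r + ((garden.map String.toList).flatten.count '@' : Int) > bags * cap then "Cr@p"
      else "Clean" := by
  induction garden with
  | nil => intro r; simp [crapLoop]
  | cons e rest ih =>
      intro r
      simp only [crapLoop, PySem.Str.count_eq]
      have hD : (PySem.Chars.count e.toList "D".toList : Int) > 0 ↔ 'D' ∈ e.toList := by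
        have : "D".toList = ['D'] := rfl
        rw [this, count_single]
        simp [List.count_pos_iff]
      by_cases hd : 'D' ∈ e.toList
      · rw [if_pos (by exact_mod_cast hD.mpr hd)]
        simp [hd]
      · rw [if_neg (by intro hh; exact hd (hD.mp hh))]
        rw [ih]
        have hat : ("@".toList : List Char) = ['@'] := rfl
        simp only [hat, count_single, List.any_cons, List.map_cons, List.flatten_cons,
          List.count_append]
        simp only [hd]
        congr 1
        push_cast
        ring_nf

-- B's histogram lookup is the count of the character in the flattened garden
theorem freq_getD (garden : List String) (c : Char) : ∀ (d : PySem.Dict Char Int),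
    (garden.foldl (fun d row => row.toList.foldl (fun d ch => d.modify ch 0 (· + 1)) d) d).getD c 0
      = d.getD c 0 + ((garden.map String.toList).flatten.count c : Int) := by
  induction garden with
  | nil => intro d; simp
  | cons e rest ih =>
      intro d
      simp only [List.foldl_cons, List.map_cons, List.flatten_cons, List.count_append]
      rw [ih, PySem.Dict.getD_foldl_modify_add_one]
      push_cast
      ring

-- ===== VERDICT (by name: the statement is the Claim_ definition above) =====
theorem crap_spec : Claim_equal_crap := by
  intro garden bags cap _
  unfold Spec_crap crap crap_alt
  rw [crapLoop_eq]
  simp only [freq_getD, PySem.Dict.getD_empty, zero_add]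
  have hD : ((0 : Int) < ((garden.map String.toList).flatten.count 'D' : Int)) ↔
      garden.any (fun e => 'D' ∈ e.toList) := by
    constructor
    · intro h
      have : 'D' ∈ (garden.map String.toList).flatten := by
        rw [← List.count_pos_iff]; exact_mod_cast h
      simp only [List.mem_flatten] at this
      obtain ⟨l, hl, hc⟩ := this
      simp only [List.mem_map] at hl
      obtain ⟨e, he, rfl⟩ := hl
      exact List.any_eq_true.mpr ⟨e, he, by simpa using hc⟩
    · intro h
      obtain ⟨e, he, hc⟩ := List.any_eq_true.mp h
      have : 'D' ∈ (garden.map String.toList).flatten :=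
        List.mem_flatten.mpr ⟨e.toList, List.mem_map.mpr ⟨e, he, rfl⟩, by simpa using hc⟩
      exact_mod_cast List.count_pos_iff.mpr this
  by_cases h : garden.any (fun e => 'D' ∈ e.toList)
  · rw [if_pos h, if_pos (show ((garden.map String.toList).flatten.count 'D' : Int) > 0 from hD.mpr h)]
  · rw [if_neg h,
      if_neg (show ¬ ((garden.map String.toList).flatten.count 'D' : Int) > 0 from by
        rw [gt_iff_lt, hD]; simpa using h)]
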